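-- pv_equiv track=rewrite | github.com/lukantozi/uni | python_basics/lect_5/practice_string_methods.py | istitle_ex_2
-- ===== SOURCE A (Python) =====
-- def istitle_ex_2(sentence):
--     word = ""
--     words_list = []
--     for l in sentence:
--         if l.isalnum():
--             word += l
--         else:
--             if word:
--                 words_list.append(word)
--                 word = ""
--
--     if word:
--         words_list.append(word)
--     non_title_list = []
--
--     for w in words_list:
--         if not w.istitle():
--             non_title_list.append(w)
--     return non_title_list
-- ===== SOURCE B (Python) =====
-- def istitle_ex_2(sentence):
--     out = []
--     n = len(sentence)
--     i = 0
--     while i < n: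
--         if sentence[i].isalnum():
--             j = i
--             prev_cased = False
--             title_ok = True
--             seen_cased = False
--             while j < n and sentence[j].isalnum():
--                 c = sentence[j]
--                 if c.isupper():
--                     if prev_cased:
--                         title_ok = False
--                     prev_cased = True
--                     seen_cased = True
--                 elif c.islower():
--                     if not prev_cased:
--                         title_ok = False
--                     prev_cased = True
--                     seen_cased = True
--                 else:
--                     prev_cased = False
--                 j += 1
--             if not (title_ok and seen_cased):
--                 out.append(sentence[i:j])
--             i = j
--         else:
--             i += 1
--     return out
-- ===== Notes on version B (the rewrite author's own statement) =====
-- stated objective: alternative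
-- what changed: Replaces A's two staged passes (buffer-accumulator tokenizer building a words list, then a filter loop calling str.istitle) with one fused index-based scan that slices each alnum run out of the sentence while computing the titlecase test inline as a three-flag state machine, appending non-titlecase slices directly to the output and never materialising a word list or calling istitle.
import Mathlib
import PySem

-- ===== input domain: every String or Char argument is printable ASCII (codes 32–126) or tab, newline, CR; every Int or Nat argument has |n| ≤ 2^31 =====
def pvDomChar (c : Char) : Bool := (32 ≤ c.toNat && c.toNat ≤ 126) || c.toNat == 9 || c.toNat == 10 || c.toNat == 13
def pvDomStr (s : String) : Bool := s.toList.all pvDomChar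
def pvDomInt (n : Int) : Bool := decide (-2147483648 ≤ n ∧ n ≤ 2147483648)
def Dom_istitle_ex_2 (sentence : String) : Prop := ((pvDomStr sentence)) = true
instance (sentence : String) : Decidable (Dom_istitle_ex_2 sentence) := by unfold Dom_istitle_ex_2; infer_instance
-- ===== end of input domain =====

-- B fuses A's two passes (tokenize into a word list, then filter with str.istitle) into one
-- index scan that computes the titlecase test inline as a flag state machine and emits slices
-- directly (objective: alternative; same asymptotic cost).


-- ===== PORT A =====
-- Python str.istitle() on ASCII (A calls the built-in)
-- state: prev (previous char was cased), found (some cased char seen)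
def pyIstitleGo : List Char → Bool → Bool → Bool
  | [], _, found => found
  | c :: cs, prev, found =>
    if PySem.Str.isupper c then
      if prev then false else pyIstitleGo cs true true
    else if PySem.Str.islower c then
      if prev then pyIstitleGo cs true true else false
    else pyIstitleGo cs false found

def pyIstitle (cs : List Char) : Bool := pyIstitleGo cs false false

-- A's first loop: mutable word buffer + words_list accumulator, flushed at the end
def istitleTokA : List Char → List Char → List (List Char) → List (List Char)
  | [], word, acc => if word ≠ [] then acc ++ [word] else acc
  | c :: cs, word, acc =>
    if PySem.Str.isalnum c then istitleTokA cs (word ++ [c]) acc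
    else if word ≠ [] then istitleTokA cs [] (acc ++ [word])
    else istitleTokA cs word acc

def istitle_ex_2 (sentence : String) : List String :=
  let wordsList := istitleTokA sentence.toList [] []
  -- A's second loop: keep the non-titlecase words
  ((wordsList.filter (fun w => ¬ pyIstitle w)).map String.mk)

-- ===== PORT B =====
-- B's inner while loop: walk the alnum run (the slice sentence[i:j]), updating the three
-- flags prev_cased / title_ok / seen_cased per character; returns (run, rest, title_ok, seen_cased)
def scanStep (c : Char) (prev ok seen : Bool) : Bool × Bool × Bool :=
  if PySem.Str.isupper c then (true, ok && !prev, true)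
  else if PySem.Str.islower c then (true, ok && prev, true)
  else (false, ok, seen)

def scanWord : List Char → Bool → Bool → Bool → (List Char × List Char × Bool × Bool)
  | [], _, ok, seen => ([], [], ok, seen)
  | c :: cs, prev, ok, seen =>
    if PySem.Str.isalnum c then
      ((c :: (scanWord cs (scanStep c prev ok seen).1 (scanStep c prev ok seen).2.1
          (scanStep c prev ok seen).2.2).1),
        (scanWord cs (scanStep c prev ok seen).1 (scanStep c prev ok seen).2.1
          (scanStep c prev ok seen).2.2).2)
    else ([], c :: cs, ok, seen)

theorem scanWord_rest_le (cs : List Char) : ∀ prev ok seen,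
    (scanWord cs prev ok seen).2.1.length ≤ cs.length := by
  induction cs with
  | nil => intro prev ok seen; simp [scanWord]
  | cons c cs ih =>
    intro prev ok seen
    rw [scanWord]
    split_ifs with h
    · exact le_trans (ih _ _ _) (Nat.le_succ _)
    · simp

theorem scanWord_cons_rest_lt (c : Char) (cs : List Char) (prev ok seen : Bool)
    (h : PySem.Str.isalnum c = true) :
    (scanWord (c :: cs) prev ok seen).2.1.length < (c :: cs).length := by
  rw [scanWord, if_pos h]
  exact Nat.lt_succ_of_le (scanWord_rest_le _ _ _ _)

-- B's outer while loop: skip a non-alnum char, or scan a whole run and emit it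
-- unless the inline state machine says it is titlecase
def istitleAltGo : List Char → List String
  | [] => []
  | c :: cs =>
    if h : PySem.Str.isalnum c = true then
      if (scanWord (c :: cs) false true false).2.2.1 &&
          (scanWord (c :: cs) false true false).2.2.2 then
        istitleAltGo (scanWord (c :: cs) false true false).2.1
      else String.mk (scanWord (c :: cs) false true false).1 ::
        istitleAltGo (scanWord (c :: cs) false true false).2.1
    else istitleAltGo cs
  termination_by cs => cs.length
  decreasing_by
    · exact scanWord_cons_rest_lt c cs false true false h
    · exact scanWord_cons_rest_lt c cs false true false h
    · simp

def istitle_ex_2_alt (sentence : String) : List String := istitleAltGo sentence.toList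

-- ===== PRECONDITION & SPEC =====
def Spec_istitle_ex_2 (sentence : String) (out : List String) : Prop := out = istitle_ex_2_alt sentence
instance (sentence : String) (out : List String) : Decidable (Spec_istitle_ex_2 sentence out) := by unfold Spec_istitle_ex_2; infer_instance

-- ===== CLAIM (what is proved, stated in full; the proofs are below) =====
def Claim_equal_istitle_ex_2 : Prop := ∀ (sentence : String), Dom_istitle_ex_2 sentence → Spec_istitle_ex_2 sentence (istitle_ex_2 sentence)

-- ===== LEMMAS AND PROOFS =====

-- proof-side bridge: the list of maximal alnum runs
def istitleTokB : List Char → List (List Char)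
  | [] => []
  | c :: cs =>
    if PySem.Str.isalnum c then
      (c :: cs.takeWhile PySem.Str.isalnum) :: istitleTokB (cs.dropWhile PySem.Str.isalnum)
    else istitleTokB cs
  termination_by cs => cs.length
  decreasing_by
    · simp only [List.length_cons]
      exact Nat.lt_succ_of_le (List.length_dropWhile_le _ _)
    · simp

theorem tokA_nil (word : List Char) (acc : List (List Char)) :
    istitleTokA [] word acc = if word ≠ [] then acc ++ [word] else acc := rfl

theorem tokA_cons (c : Char) (cs word : List Char) (acc : List (List Char)) :
    istitleTokA (c :: cs) word acc =
      if PySem.Str.isalnum c then istitleTokA cs (word ++ [c]) acc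
      else if word ≠ [] then istitleTokA cs [] (acc ++ [word])
      else istitleTokA cs word acc := rfl

theorem tokB_nil : istitleTokB [] = [] := by rw [istitleTokB]

theorem tokB_cons (c : Char) (cs : List Char) :
    istitleTokB (c :: cs) =
      if PySem.Str.isalnum c then
        (c :: cs.takeWhile PySem.Str.isalnum) :: istitleTokB (cs.dropWhile PySem.Str.isalnum)
      else istitleTokB cs := by rw [istitleTokB]

-- the accumulator only prefixes the result
theorem tokA_acc (cs : List Char) : ∀ (word : List Char) (acc : List (List Char)),
    istitleTokA cs word acc = acc ++ istitleTokA cs word [] := by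
  induction cs with
  | nil =>
    intro word acc
    by_cases h : word = [] <;> simp [tokA_nil, h]
  | cons c cs ih =>
    intro word acc
    rw [tokA_cons, tokA_cons]
    split_ifs with h1 h2
    · rw [ih (word ++ [c]) acc, ih (word ++ [c]) []]
    · rw [ih [] (acc ++ [word]), ih [] ([] ++ [word])]
      simp
    · exact ih word acc

-- A's tokenizer produces exactly the maximal alnum runs
theorem tokA_eq_tokB (n : Nat) : ∀ cs : List Char, cs.length ≤ n →
    (istitleTokA cs [] [] = istitleTokB cs ∧
     ∀ word : List Char, word ≠ [] →
       istitleTokA cs word [] =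
         (word ++ cs.takeWhile PySem.Str.isalnum) ::
           istitleTokB (cs.dropWhile PySem.Str.isalnum)) := by
  induction n with
  | zero =>
    intro cs hcs
    have hnil : cs = [] := List.length_eq_zero_iff.mp (Nat.le_zero.mp hcs)
    subst hnil
    refine ⟨by rw [tokA_nil, tokB_nil]; simp, fun word hw => ?_⟩
    simp [tokA_nil, tokB_nil, hw]
  | succ n ih =>
    intro cs hcs
    cases cs with
    | nil =>
      refine ⟨by rw [tokA_nil, tokB_nil]; simp, fun word hw => ?_⟩
      simp [tokA_nil, tokB_nil, hw]
    | cons c cs =>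
      have hlen : cs.length ≤ n := Nat.le_of_succ_le_succ hcs
      by_cases h : PySem.Str.isalnum c = true
      · constructor
        · rw [tokA_cons, if_pos h, List.nil_append,
            (ih cs hlen).2 [c] (by simp), tokB_cons, if_pos h]
          simp
        · intro word hw
          rw [tokA_cons, if_pos h, (ih cs hlen).2 (word ++ [c]) (by simp),
            List.takeWhile_cons, if_pos h, List.dropWhile_cons, if_pos h]
          simp
      · have hh : ¬ PySem.Str.isalnum c = true := h
        constructor
        · rw [tokA_cons, if_neg hh, if_neg (by simp), (ih cs hlen).1,
            tokB_cons, if_neg hh]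
        · intro word hw
          rw [tokA_cons, if_neg hh, if_pos hw, tokA_acc, (ih cs hlen).1]
          rw [List.takeWhile_cons, if_neg hh, List.dropWhile_cons, if_neg hh,
            tokB_cons, if_neg hh]
          simp

-- scanWord's run/rest are takeWhile/dropWhile
theorem scanWord_run_rest (cs : List Char) : ∀ prev ok seen,
    (scanWord cs prev ok seen).1 = cs.takeWhile PySem.Str.isalnum ∧
    (scanWord cs prev ok seen).2.1 = cs.dropWhile PySem.Str.isalnum := by
  induction cs with
  | nil => intro prev ok seen; simp [scanWord]
  | cons c cs ih =>
    intro prev ok seen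
    rw [scanWord]
    split_ifs with h
    · rw [List.takeWhile_cons, if_pos h, List.dropWhile_cons, if_pos h]
      exact ⟨by simp [(ih _ _ _).1], (ih _ _ _).2⟩
    · simp [List.takeWhile_cons, h, List.dropWhile_cons]

-- once title_ok is false it stays false
theorem scanWord_ok_false (cs : List Char) : ∀ prev seen,
    (scanWord cs prev false seen).2.2.1 = false := by
  induction cs with
  | nil => intro prev seen; simp [scanWord]
  | cons c cs ih =>
    intro prev seen
    rw [scanWord]
    split_ifs with h <;> simp [scanStep, ih] <;> split_ifs <;> simp [ih]

-- with title_ok = true, the two flags at the end of the run decide pyIstitleGo on the run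
theorem scanWord_title (cs : List Char) : ∀ prev seen,
    ((scanWord cs prev true seen).2.2.1 && (scanWord cs prev true seen).2.2.2) =
      pyIstitleGo (cs.takeWhile PySem.Str.isalnum) prev seen := by
  induction cs with
  | nil => intro prev seen; simp [scanWord, pyIstitleGo]
  | cons c cs ih =>
    intro prev seen
    rw [scanWord]
    by_cases h : PySem.Str.isalnum c = true
    · rw [if_pos h, List.takeWhile_cons, if_pos h]
      by_cases hu : PySem.Str.isupper c = true
      · simp only [scanStep, hu, if_true]
        cases prev with
        | false => simpa [pyIstitleGo, hu] using ih true true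
        | true => simp [pyIstitleGo, hu, scanWord_ok_false]
      · by_cases hl : PySem.Str.islower c = true
        · simp only [scanStep, hu, hl, if_false, if_true]
          cases prev with
          | true => simpa [pyIstitleGo, hu, hl] using ih true true
          | false => simp [pyIstitleGo, hu, hl, scanWord_ok_false]
        · simp only [scanStep, hu, hl, if_false]
          simpa [pyIstitleGo, hu, hl] using ih false seen
    · rw [if_neg h, List.takeWhile_cons, if_neg h]
      simp [pyIstitleGo]

-- B's fused scan equals tokenize-then-filter
theorem altGo_eq (n : Nat) : ∀ cs : List Char, cs.length ≤ n →
    istitleAltGo cs = ((istitleTokB cs).filter (fun w => ¬ pyIstitle w)).map String.mk := by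
  induction n with
  | zero =>
    intro cs hcs
    have hnil : cs = [] := List.length_eq_zero_iff.mp (Nat.le_zero.mp hcs)
    subst hnil
    rw [istitleAltGo, tokB_nil]; rfl
  | succ n ih =>
    intro cs hcs
    cases cs with
    | nil => rw [istitleAltGo, tokB_nil]; rfl
    | cons c cs =>
      have hlen : cs.length ≤ n := Nat.le_of_succ_le_succ hcs
      rw [istitleAltGo, tokB_cons]
      by_cases h : PySem.Str.isalnum c = true
      · rw [dif_pos h, if_pos h]
        have hrun := (scanWord_run_rest (c :: cs) false true false).1
        have hrest := (scanWord_run_rest (c :: cs) false true false).2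
        have htitle := scanWord_title (c :: cs) false false
        have hrest' : (scanWord (c :: cs) false true false).2.1 = cs.dropWhile PySem.Str.isalnum := by
          rw [hrest, List.dropWhile_cons, if_pos h]
        have hrestlen : (cs.dropWhile PySem.Str.isalnum).length ≤ n :=
          le_trans (List.length_dropWhile_le _ _) hlen
        have hrun' : (scanWord (c :: cs) false true false).1 = c :: cs.takeWhile PySem.Str.isalnum := by
          rw [hrun, List.takeWhile_cons, if_pos h]
        rw [List.filter_cons]
        by_cases ht : pyIstitle (c :: cs.takeWhile PySem.Str.isalnum) = true
        · have hb : ((scanWord (c :: cs) false true false).2.2.1 &&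
              (scanWord (c :: cs) false true false).2.2.2) = true := by
            rw [htitle, List.takeWhile_cons, if_pos h]; exact ht
          rw [if_pos hb, hrest', ih _ hrestlen]
          simp [pyIstitle] at ht
          simp [pyIstitle, ht]
        · have hb : ((scanWord (c :: cs) false true false).2.2.1 &&
              (scanWord (c :: cs) false true false).2.2.2) = false := by
            rw [htitle, List.takeWhile_cons, if_pos h]
            exact Bool.not_eq_true _ ▸ (by simpa using ht)
          rw [hb, if_neg (by simp), hrest', ih _ hrestlen, hrun']
          simp [pyIstitle] at ht
          simp [pyIstitle, ht]
      · rw [dif_neg h, if_neg h]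
        exact ih cs hlen

-- ===== VERDICT (by name: the statement is the Claim_ definition above) =====
theorem istitle_ex_2_spec : Claim_equal_istitle_ex_2 := by
  intro sentence _
  unfold Spec_istitle_ex_2 istitle_ex_2 istitle_ex_2_alt
  rw [(tokA_eq_tokB sentence.toList.length sentence.toList le_rfl).1,
    altGo_eq sentence.toList.length sentence.toList le_rfl]
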